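-- pv_equiv track=rewrite | github.com/ffancer/study_with_codewars_part2 | 7 kyu The Poet And The Pendulum.py | pendulum
-- ===== SOURCE A (Python) =====
-- def pendulum(values):
--     lst_middle = [min(values)]
--     values.remove(min(values))
--     lst_left, lst_right = [], []
--     cnt = 0
--
--     while values:
--         min_val = min(values)
--         if cnt % 2 == 0:
--             lst_right.append(min_val)
--         else:
--             lst_left.append(min_val)
--         cnt += 1
--         values.remove(min(values))
--
--     return lst_left[::-1] + lst_middle + lst_right
-- ===== SOURCE B (Python) =====
-- def pendulum(values):
--     s = sorted(values)
--     return s[2::2][::-1] + s[:1] + s[1::2]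
-- ===== Notes on version B (the rewrite author's own statement) =====
-- stated objective: faster
-- what changed: Instead of repeatedly scanning for and removing the minimum in a while loop, B sorts the list once and builds the pendulum from the two step-2 slices of the sorted list.
-- outside the precondition, e.g. on pendulum([]): A raises ValueError, B returns []
import Mathlib
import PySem

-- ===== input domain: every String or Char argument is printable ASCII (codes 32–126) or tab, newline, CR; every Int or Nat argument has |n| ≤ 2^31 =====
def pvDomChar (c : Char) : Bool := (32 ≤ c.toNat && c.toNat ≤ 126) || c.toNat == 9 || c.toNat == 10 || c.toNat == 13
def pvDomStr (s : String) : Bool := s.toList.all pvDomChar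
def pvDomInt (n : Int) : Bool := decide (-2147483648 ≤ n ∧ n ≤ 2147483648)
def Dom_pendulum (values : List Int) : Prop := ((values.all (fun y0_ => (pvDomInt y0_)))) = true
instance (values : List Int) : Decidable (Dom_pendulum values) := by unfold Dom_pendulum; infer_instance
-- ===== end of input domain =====

-- B replaces A's O(n^2) repeated min-scan-and-remove by one sort plus two step-2 slices (objective: faster).
-- A mutates its argument in place (empties it); B does not — the claim is about the return value only.

-- ===== PORT A =====

-- needed while defining pendLoop (termination): removing an element shortens the list
theorem pv_remove?_length {xs ys : List Int} {v : Int}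
    (h : PySem.List.remove? xs v = some ys) : ys.length < xs.length := by
  have hv : v ∈ xs := by
    by_contra hv
    rw [(PySem.List.remove?_eq_none_iff xs v).mpr hv] at h
    simp at h
  rw [PySem.List.remove?_eq_some_erase xs v hv] at h
  cases h
  calc (xs.erase v).length = xs.length - 1 := List.length_erase_of_mem hv
    _ < xs.length := Nat.sub_lt (List.length_pos_of_mem hv) one_pos

-- the while loop of A: state (values, lst_left, lst_right, cnt)
def pendLoop (values lst_left lst_right : List Int) (cnt : Int) : List Int × List Int :=
  match PySem.List.min? values (fun x => x) with
  | none => (lst_left, lst_right)            -- while values: loop exits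
  | some min_val =>
    match h2 : PySem.List.remove? values min_val with
    | none => (lst_left, lst_right)          -- unreachable: min_val ∈ values
    | some vs =>
      if PySem.Int.mod cnt 2 = 0 then pendLoop vs lst_left (lst_right ++ [min_val]) (cnt + 1)
      else pendLoop vs (lst_left ++ [min_val]) lst_right (cnt + 1)
termination_by values.length
decreasing_by all_goals exact pv_remove?_length h2

def pendulum (values : List Int) : List Int :=
  match PySem.List.min? values (fun x => x) with
  | none => []                               -- Python: min([]) raises ValueError (outside Pre_)
  | some m0 =>
    match PySem.List.remove? values m0 with
    | none => []                             -- unreachable: m0 ∈ values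
    | some vs =>
      let p := pendLoop vs [] [] 0      -- p.1 = lst_left, p.2 = lst_right
      -- lst_left[::-1] + lst_middle + lst_right  (step -1 ≠ 0: slice? is never none)
      ((PySem.List.slice? p.1 none none (-1)).getD []) ++ [m0] ++ p.2

-- ===== PORT B =====
def pendulum_alt (values : List Int) : List Int :=
  let s := PySem.List.sorted values (fun x => x) false
  -- s[2::2][::-1] + s[:1] + s[1::2]  (steps 2 and -1 are ≠ 0: slice? is never none)
  ((PySem.List.slice? ((PySem.List.slice? s (some 2) none 2).getD []) none none (-1)).getD [])
    ++ PySem.List.slice s none (some 1)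
    ++ ((PySem.List.slice? s (some 1) none 2).getD [])

-- ===== PRECONDITION & SPEC =====
-- Pre_ excludes only the empty list, on which Python's min([]) raises ValueError.
def Pre_pendulum (values : List Int) : Prop := values ≠ []
instance (values : List Int) : Decidable (Pre_pendulum values) := by unfold Pre_pendulum; infer_instance
def pvWitness_pendulum : List Int := [3, 1, 2]

def Spec_pendulum (values : List Int) (out : List Int) : Prop := out = pendulum_alt values
instance (values : List Int) (out : List Int) : Decidable (Spec_pendulum values out) := by unfold Spec_pendulum; infer_instance

-- ===== CLAIM (what is proved, stated in full; the proofs are below) =====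
def Claim_equal_pendulum : Prop := ∀ (values : List Int), Dom_pendulum values → Pre_pendulum values → Spec_pendulum values (pendulum values)

-- ===== LEMMAS AND PROOFS =====

-- elements at even positions (0, 2, 4, …)
def alt1 : List Int → List Int
  | [] => []
  | [x] => [x]
  | x :: _ :: t => x :: alt1 t

-- elements at odd positions (1, 3, 5, …)
def alt2 (t : List Int) : List Int := alt1 t.tail

theorem alt2_cons (x : Int) (t : List Int) : alt2 (x :: t) = alt1 t := rfl
theorem alt1_cons (x : Int) (t : List Int) : alt1 (x :: t) = x :: alt2 t := by
  cases t <;> rfl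

-- sorted(values) = min :: sorted(values with the first min removed)
theorem sorted_cons_min {values vs : List Int} {m : Int}
    (hm : PySem.List.min? values (fun x => x) = some m)
    (hr : PySem.List.remove? values m = some vs) :
    PySem.List.sorted values (fun x => x) false
      = m :: PySem.List.sorted vs (fun x => x) false := by
  have hmem : m ∈ values := PySem.List.min?_mem hm
  have hvs : vs = values.erase m := by
    rw [PySem.List.remove?_eq_some_erase values m hmem] at hr
    exact (Option.some_inj.mp hr).symm
  apply PySem.List.sorted_id_eq_of_perm_of_pairwise
  · subst hvs
    exact (PySem.List.sorted_perm _ _ _).cons m |>.trans (List.perm_cons_erase hmem).symm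
  · rw [List.pairwise_cons]
    refine ⟨?_, ?_⟩
    · intro y hy
      have : y ∈ vs := (PySem.List.mem_sorted _ _ _ _).mp hy
      subst hvs
      exact PySem.List.min?_isMin hm y (List.mem_of_mem_erase this)
    · exact PySem.List.sorted_pairwise vs (fun x => x)

theorem mod_two_flip (cnt : Int) (h : PySem.Int.mod cnt 2 = 0) :
    ¬ PySem.Int.mod (cnt + 1) 2 = 0 := by
  rw [PySem.Int.mod_eq_emod_of_pos (by norm_num)] at h ⊢
  omega

theorem mod_two_flip' (cnt : Int) (h : ¬ PySem.Int.mod cnt 2 = 0) :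
    PySem.Int.mod (cnt + 1) 2 = 0 := by
  rw [PySem.Int.mod_eq_emod_of_pos (by norm_num)] at h ⊢
  omega

-- loop invariant: pendLoop distributes sorted(values) alternately onto right (even cnt) and left
theorem pendLoop_eq (n : Nat) : ∀ (values l r : List Int) (cnt : Int), values.length = n →
    pendLoop values l r cnt =
      if PySem.Int.mod cnt 2 = 0 then
        (l ++ alt2 (PySem.List.sorted values (fun x => x) false),
         r ++ alt1 (PySem.List.sorted values (fun x => x) false))
      else
        (l ++ alt1 (PySem.List.sorted values (fun x => x) false),
         r ++ alt2 (PySem.List.sorted values (fun x => x) false)) := by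
  induction n using Nat.strong_induction_on with
  | _ n ih =>
    intro values l r cnt hn
    match hm : PySem.List.min? values (fun x => x) with
    | none =>
      have hnil : values = [] := (PySem.List.min?_eq_none_iff _ _).mp hm
      subst hnil
      rw [pendLoop]
      simp only [hm]
      have hs : PySem.List.sorted ([] : List Int) (fun x => x) false = [] := rfl
      rw [hs]
      simp [alt1, alt2]
    | some m =>
      have hmem : m ∈ values := PySem.List.min?_mem hm
      match hr : PySem.List.remove? values m with
      | none =>
        exact absurd ((PySem.List.remove?_eq_none_iff values m).mp hr) (by simp [hmem])
      | some vs =>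
        have hlen : vs.length < n := hn ▸ pv_remove?_length hr
        have hsort := sorted_cons_min hm hr
        rw [pendLoop]
        simp only [hm]
        split
        · next h2 => rw [hr] at h2; simp at h2
        · next vs' h2 =>
          rw [hr] at h2
          injection h2 with h2
          subst h2
          by_cases hc : PySem.Int.mod cnt 2 = 0
          · rw [if_pos hc, ih vs.length hlen vs l (r ++ [m]) (cnt + 1) rfl,
              if_neg (mod_two_flip cnt hc), if_pos hc, hsort, alt1_cons, alt2_cons]
            simp
          · rw [if_neg hc, ih vs.length hlen vs (l ++ [m]) r (cnt + 1) rfl,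
              if_pos (mod_two_flip' cnt hc), if_neg hc, hsort, alt1_cons, alt2_cons]
            simp

-- s[a::2] (a : Nat) is the even-position elements of s.drop a
theorem alt1_eq_filterMap (t : List Int) (c : Nat)
    (hc : (c : Int) = ((t.length : Int) + 1) / 2) :
    (List.range c).filterMap (fun k : Nat => t[2 * k]?) = alt1 t := by
  induction t using alt1.induct generalizing c with
  | case1 =>
    have hc0 : (c : Int) = 0 := by simpa using hc
    have : c = 0 := by exact_mod_cast hc0
    subst this; rfl
  | case2 x =>
    have hc1 : (c : Int) = 1 := by simpa using hc
    have : c = 1 := by exact_mod_cast hc1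
    subst this; rfl
  | case3 x y t iht =>
    have hc' : (c : Int) = ((t.length : Int) + 1) / 2 + 1 := by
      simp only [List.length_cons] at hc; push_cast at hc ⊢; omega
    have hpos : 0 ≤ ((t.length : Int) + 1) / 2 := by positivity
    obtain ⟨c', hc'eq⟩ : ∃ c' : Nat, (c' : Int) = ((t.length : Int) + 1) / 2 :=
      ⟨(((t.length : Int) + 1) / 2).toNat, Int.toNat_of_nonneg hpos⟩
    have hcc : c = c' + 1 := by omega
    subst hcc
    rw [List.range_succ_eq_map, List.filterMap_cons, List.filterMap_map]
    have h0 : (x :: y :: t)[2 * 0]? = some x := rfl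
    rw [h0]
    have hcong : (List.range c').filterMap ((fun k : Nat => (x :: y :: t)[2 * k]?) ∘ Nat.succ)
        = (List.range c').filterMap (fun k : Nat => t[2 * k]?) := by
      apply List.filterMap_congr
      intro k _
      show (x :: y :: t)[2 * (k + 1)]? = t[2 * k]?
      have h2 : 2 * (k + 1) = 2 * k + 1 + 1 := by omega
      rw [h2]
      simp
    rw [hcong, iht c' hc'eq, alt1_cons, alt2_cons]

theorem slice?_step2 (xs : List Int) (a : Nat) :
    PySem.List.slice? xs (some (a : Int)) none 2 = some (alt1 (xs.drop a)) := by
  have hnn : ¬ ((a : Int) < 0) := by omega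
  simp only [PySem.List.slice?, PySem.List.sliceIndices]
  norm_num [hnn]
  by_cases hle : a < xs.length
  · rw [min_eq_left (by exact_mod_cast le_of_lt hle : (a : Int) ≤ (xs.length : Int)), if_pos hle]
    have hshift : ∀ k : Nat, xs[((a : Int) + 2 * (k : Int)).toNat]? = (xs.drop a)[2 * k]? := by
      intro k
      have h1 : ((a : Int) + 2 * (k : Int)).toNat = a + 2 * k := by omega
      rw [h1, List.getElem?_drop]
    rw [List.filterMap_congr (fun k _ => hshift k)]
    rw [alt1_eq_filterMap (xs.drop a) _ ?_]
    have hnum : ((xs.length : Int) - (a : Int) + 2 - 1) = (((xs.drop a).length : Int) + 1) := by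
      simp only [List.length_drop]; omega
    rw [hnum]
    exact Int.toNat_of_nonneg (by positivity)
  · rw [min_eq_right (by omega : (xs.length : Int) ≤ (a : Int)), if_neg (by omega)]
    rw [List.drop_eq_nil_of_le (by omega)]
    rfl

theorem slice?_rev (xs : List Int) :
    PySem.List.slice? xs none none (-1) = some xs.reverse :=
  PySem.List.slice?_none_none_neg_one xs

-- ===== VERDICT (by name: the statement is the Claim_ definition above) =====
theorem pendulum_spec : Claim_equal_pendulum := by
  intro values _ hpre
  unfold Spec_pendulum pendulum pendulum_alt
  split
  · next hm => exact absurd ((PySem.List.min?_eq_none_iff _ _).mp hm) hpre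
  · next m hm =>
    have hmem : m ∈ values := PySem.List.min?_mem hm
    split
    · next hr => exact absurd ((PySem.List.remove?_eq_none_iff _ _).mp hr) (by simp [hmem])
    · next vs hr =>
      rw [pendLoop_eq vs.length vs [] [] 0 rfl, if_pos (by decide)]
      have hsort := sorted_cons_min hm hr
      set t := PySem.List.sorted vs (fun x => x) false with ht
      rw [hsort]
      dsimp only
      have h2 : PySem.List.slice? (m :: t) (some 2) none 2 = some (alt1 ((m :: t).drop 2)) :=
        slice?_step2 (m :: t) 2
      have h1 : PySem.List.slice? (m :: t) (some 1) none 2 = some (alt1 ((m :: t).drop 1)) :=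
        slice?_step2 (m :: t) 1
      have hdrop2 : (m :: t).drop 2 = t.tail := by cases t <;> rfl
      have hdrop1 : (m :: t).drop 1 = t := rfl
      rw [h2, h1, hdrop2, hdrop1]
      have htake : PySem.List.slice (m :: t) none (some ((1 : Nat) : Int)) = [m] := by
        rw [PySem.List.slice_to_natCast (m :: t) 1]; rfl
      have htake' : PySem.List.slice (m :: t) none (some 1) = [m] := by exact_mod_cast htake
      rw [htake', slice?_rev, slice?_rev]
      simp [alt2]
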